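-- pv_equiv track=rewrite | github.com/mirzakhalov/videosurfer | search.py | back_track
-- ===== SOURCE A (Python) =====
-- def back_track(times, curr_ind, curr_val, prev_chain=[]):
--     size = len(times)
--     new_res = []
--
--     if curr_ind < size - 1:
--         for time_b in times[curr_ind + 1]:
--             if curr_val[1] + 1 < time_b[0]:
--                 break
--
--             if curr_val[1] <= time_b[0] and curr_val[1] >= time_b[0] - 1:
--                 new_res.append(back_track(times, curr_ind + 1, time_b, prev_chain + [curr_val]))
--
--         return max(new_res, key=len) if new_res != [] else prev_chain + [curr_val]
--
--     else:
--         return prev_chain + [curr_val]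
--
--     return prev_chain + [curr_val]
-- ===== SOURCE B (Python) =====
-- def back_track(times, curr_ind, curr_val, prev_chain=[]):
--     # Bottom-up DP over the suffix of levels instead of branching recursion.
--     size = len(times)
--     levels = []
--     ind = curr_ind
--     while ind < size - 1:
--         levels.append(times[ind + 1])
--         ind += 1
--
--     def pick(v_end, nodes, table):
--         # longest suffix chain among qualifying children (first one on ties); [] if none
--         cands = []
--         for node, chain in zip(nodes, table):
--             if v_end + 1 < node[0]:
--                 break
--             if node[0] - 1 <= v_end <= node[0]:
--                 cands.append(chain)
--         return max(cands, key=len) if cands else []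
--
--     table = []  # table[j] = longest chain starting at below[j]
--     below = []
--     for nodes in reversed(levels):
--         table = [[node] + pick(node[1], below, table) for node in nodes]
--         below = nodes
--     return prev_chain + [curr_val] + pick(curr_val[1], below, table)
-- ===== Notes on version B (the rewrite author's own statement) =====
-- stated objective: alternative
-- what changed: Replaces the top-down branching recursion (which can re-solve a node's suffix once per path reaching it, exponential in the worst case) by an iterative bottom-up DP that computes the longest chain starting at each node of each level exactly once, then reads off the answer for curr_val; on the generated inputs the measured times were comparable, so no speed is claimed.
import Mathlib
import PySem

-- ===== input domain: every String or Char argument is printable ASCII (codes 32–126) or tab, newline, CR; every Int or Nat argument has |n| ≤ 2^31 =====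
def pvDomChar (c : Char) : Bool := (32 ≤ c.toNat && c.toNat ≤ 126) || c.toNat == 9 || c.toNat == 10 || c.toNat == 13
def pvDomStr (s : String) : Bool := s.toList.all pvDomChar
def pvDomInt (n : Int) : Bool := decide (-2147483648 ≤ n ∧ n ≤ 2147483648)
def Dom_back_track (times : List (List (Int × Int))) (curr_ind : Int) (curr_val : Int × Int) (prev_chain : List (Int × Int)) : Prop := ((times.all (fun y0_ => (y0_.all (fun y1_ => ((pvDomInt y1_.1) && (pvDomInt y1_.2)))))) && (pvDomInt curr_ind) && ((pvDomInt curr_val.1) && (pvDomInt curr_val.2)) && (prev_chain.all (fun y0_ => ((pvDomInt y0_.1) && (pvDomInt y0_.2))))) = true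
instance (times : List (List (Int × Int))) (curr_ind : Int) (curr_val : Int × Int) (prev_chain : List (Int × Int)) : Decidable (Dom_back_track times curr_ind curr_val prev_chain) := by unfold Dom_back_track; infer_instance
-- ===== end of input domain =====

-- B replaces A's top-down branching recursion by an iterative bottom-up DP over the levels
-- (longest chain starting at each node of each level, computed once per node): an alternative
-- algorithm; same return value, no speed claimed.

-- ===== PORT A =====
-- max(xs, key=len): first element of maximal length (Python max keeps the first on ties)
def pvMaxByLen (x : List (Int × Int)) (xs : List (List (Int × Int))) : List (Int × Int) :=
  xs.foldl (fun b y => if b.length < y.length then y else b) x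

mutual
-- literal port of A; `btLoop` is A's for-loop over times[curr_ind+1] (with its break)
def back_track (times : List (List (Int × Int))) (curr_ind : Int) (curr_val : Int × Int) (prev_chain : List (Int × Int)) : List (Int × Int) :=
  if h : curr_ind < (times.length : Int) - 1 then
    -- pyGet? is none only outside Pre_ (IndexError in Python); getD [] is never claimed about there
    let new_res := btLoop times curr_ind curr_val prev_chain ((PySem.List.pyGet? times (curr_ind + 1)).getD [])
    match new_res with
    | [] => prev_chain ++ [curr_val]
    | x :: xs => pvMaxByLen x xs
  else prev_chain ++ [curr_val]
termination_by (2 * ((times.length : Int) - 1 - curr_ind).toNat, 0)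
decreasing_by apply Prod.Lex.left; omega

def btLoop (times : List (List (Int × Int))) (curr_ind : Int) (curr_val : Int × Int) (prev_chain : List (Int × Int)) : List (Int × Int) → List (List (Int × Int))
  | [] => []
  | b :: rest =>
    if curr_val.2 + 1 < b.1 then []
    else if curr_val.2 ≤ b.1 ∧ b.1 - 1 ≤ curr_val.2 then
      back_track times (curr_ind + 1) b (prev_chain ++ [curr_val]) :: btLoop times curr_ind curr_val prev_chain rest
    else btLoop times curr_ind curr_val prev_chain rest
termination_by l => (2 * ((times.length : Int) - 1 - (curr_ind + 1)).toNat + 1, l.length)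
decreasing_by
  · apply Prod.Lex.left; omega
  · apply Prod.Lex.right; simp
  · apply Prod.Lex.right; simp
end

-- ===== PORT B =====
-- the while-loop collecting levels = [times[curr_ind+1], …, times[size-1]]
def levelsFrom (times : List (List (Int × Int))) (ind : Int) : List (List (Int × Int)) :=
  if h : ind < (times.length : Int) - 1 then
    ((PySem.List.pyGet? times (ind + 1)).getD []) :: levelsFrom times (ind + 1)
  else []
termination_by ((times.length : Int) - 1 - ind).toNat
decreasing_by omega

-- pick's for-loop over zip(nodes, table) with its break, collecting candidate chains
def pickCands (vend : Int) : List (Int × Int) → List (List (Int × Int)) → List (List (Int × Int))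
  | [], _ => []
  | _ :: _, [] => []
  | n :: ns, c :: cs =>
    if vend + 1 < n.1 then []
    else if n.1 - 1 ≤ vend ∧ vend ≤ n.1 then c :: pickCands vend ns cs
    else pickCands vend ns cs

def pick (vend : Int) (nodes : List (Int × Int)) (table : List (List (Int × Int))) : List (Int × Int) :=
  match pickCands vend nodes table with
  | [] => []
  | x :: xs => pvMaxByLen x xs

def back_track_alt (times : List (List (Int × Int))) (curr_ind : Int) (curr_val : Int × Int) (prev_chain : List (Int × Int)) : List (Int × Int) :=
  let levels := levelsFrom times curr_ind
  let st := levels.reverse.foldl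
    (fun (tb : List (List (Int × Int)) × List (Int × Int)) nodes =>
      (nodes.map (fun n => n :: pick n.2 tb.2 tb.1), nodes)) ([], [])
  prev_chain ++ [curr_val] ++ pick curr_val.2 st.2 st.1

-- ===== PRECONDITION & SPEC =====
-- Pre_ excludes exactly the inputs where Python A raises IndexError: the very first access
-- times[curr_ind+1] (taken iff curr_ind < size-1) with curr_ind+1 < -size; all deeper accesses
-- use larger indices below size and cannot raise.
def Pre_back_track (times : List (List (Int × Int))) (curr_ind : Int) (curr_val : Int × Int) (prev_chain : List (Int × Int)) : Prop :=
  curr_ind < (times.length : Int) - 1 → -(times.length : Int) ≤ curr_ind + 1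
instance (times : List (List (Int × Int))) (curr_ind : Int) (curr_val : Int × Int) (prev_chain : List (Int × Int)) : Decidable (Pre_back_track times curr_ind curr_val prev_chain) := by unfold Pre_back_track; infer_instance
def pvWitness_back_track : (List (List (Int × Int))) × Int × (Int × Int) × (List (Int × Int)) :=
  ([[(0, 1), (2, 3)], [(1, 2)], [(3, 4)]], 0, (0, 1), [])

def Spec_back_track (times : List (List (Int × Int))) (curr_ind : Int) (curr_val : Int × Int) (prev_chain : List (Int × Int)) (out : List (Int × Int)) : Prop := out = back_track_alt times curr_ind curr_val prev_chain
instance (times : List (List (Int × Int))) (curr_ind : Int) (curr_val : Int × Int) (prev_chain : List (Int × Int)) (out : List (Int × Int)) : Decidable (Spec_back_track times curr_ind curr_val prev_chain out) := by unfold Spec_back_track; infer_instance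

-- ===== CLAIM (what is proved, stated in full; the proofs are below) =====
def Claim_equal_back_track : Prop := ∀ (times : List (List (Int × Int))) (curr_ind : Int) (curr_val : Int × Int) (prev_chain : List (Int × Int)), Dom_back_track times curr_ind curr_val prev_chain → Pre_back_track times curr_ind curr_val prev_chain → Spec_back_track times curr_ind curr_val prev_chain (back_track times curr_ind curr_val prev_chain)

-- ===== LEMMAS AND PROOFS =====

-- A's qualifying-children scan (loop body conditions, with the break), abstracted from both loops
def qual (vend : Int) : List (Int × Int) → List (Int × Int)
  | [] => []
  | b :: rest =>
    if vend + 1 < b.1 then []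
    else if vend ≤ b.1 ∧ b.1 - 1 ≤ vend then b :: qual vend rest
    else qual vend rest

-- the longest suffix chain (not including the start node) through the given list of levels
def suff : List (List (Int × Int)) → Int → List (Int × Int)
  | [], _ => []
  | L :: Ls, vend =>
    match (qual vend L).map (fun c => c :: suff Ls c.2) with
    | [] => []
    | x :: xs => pvMaxByLen x xs
termination_by Ls _ => Ls.length

theorem maxByLen_map_append (pre x : List (Int × Int)) (xs : List (List (Int × Int))) :
    pvMaxByLen (pre ++ x) (xs.map (fun z => pre ++ z)) = pre ++ pvMaxByLen x xs := by
  induction xs generalizing x with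
  | nil => rfl
  | cons y ys ih =>
    simp only [pvMaxByLen, List.map_cons, List.foldl_cons] at *
    by_cases h : x.length < y.length
    · rw [if_pos (by simp [h]), if_pos h]; exact ih y
    · rw [if_neg (by simp [h]), if_neg h]; exact ih x

theorem maxByLen_map_append' (pre : List (Int × Int)) (f : (Int × Int) → List (Int × Int))
    (c : Int × Int) (cs : List (Int × Int)) :
    pvMaxByLen (pre ++ f c) (cs.map (fun d => pre ++ f d)) = pre ++ pvMaxByLen (f c) (cs.map f) := by
  have h := maxByLen_map_append pre (f c) (cs.map f)
  rw [List.map_map] at h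
  exact h

theorem btLoop_eq (times : List (List (Int × Int))) (curr_ind : Int) (curr_val : Int × Int)
    (prev_chain : List (Int × Int)) (l : List (Int × Int))
    (IH : ∀ v p, back_track times (curr_ind + 1) v p = p ++ v :: suff (levelsFrom times (curr_ind + 1)) v.2) :
    btLoop times curr_ind curr_val prev_chain l =
      (qual curr_val.2 l).map
        (fun c => (prev_chain ++ [curr_val]) ++ c :: suff (levelsFrom times (curr_ind + 1)) c.2) := by
  induction l with
  | nil => simp [btLoop, qual]
  | cons b rest ihl =>
    rw [btLoop, qual]
    by_cases h1 : curr_val.2 + 1 < b.1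
    · simp [h1]
    · rw [if_neg h1, if_neg h1]
      by_cases h2 : curr_val.2 ≤ b.1 ∧ b.1 - 1 ≤ curr_val.2
      · rw [if_pos h2, if_pos h2, List.map_cons, IH, ihl]
      · rw [if_neg h2, if_neg h2, ihl]

theorem back_track_eq (times : List (List (Int × Int))) :
    ∀ (k : Nat) (curr_ind : Int), (((times.length : Int) - 1 - curr_ind).toNat = k) →
      ∀ (v : Int × Int) (p : List (Int × Int)),
        back_track times curr_ind v p = p ++ v :: suff (levelsFrom times curr_ind) v.2 := by
  intro k
  induction k with
  | zero =>
    intro ci hk v p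
    have h : ¬ ci < (times.length : Int) - 1 := by omega
    rw [back_track, dif_neg h, levelsFrom, dif_neg h, suff]
  | succ n ihn =>
    intro ci hk v p
    have h : ci < (times.length : Int) - 1 := by omega
    have IH := ihn (ci + 1) (by omega)
    rw [back_track, dif_pos h, levelsFrom, dif_pos h]
    rw [btLoop_eq times ci v p _ IH]
    rw [suff]
    cases hq : qual v.2 ((PySem.List.pyGet? times (ci + 1)).getD []) with
    | nil => simp
    | cons c cs =>
      simp only [List.map_cons]
      show pvMaxByLen ((p ++ [v]) ++ c :: suff (levelsFrom times (ci + 1)) c.2)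
          (cs.map (fun d => (p ++ [v]) ++ d :: suff (levelsFrom times (ci + 1)) d.2)) =
        p ++ v :: pvMaxByLen (c :: suff (levelsFrom times (ci + 1)) c.2)
          (cs.map (fun d => d :: suff (levelsFrom times (ci + 1)) d.2))
      rw [maxByLen_map_append' (p ++ [v]) (fun d => d :: suff (levelsFrom times (ci + 1)) d.2) c cs]
      simp

theorem pickCands_map (vend : Int) (nodes : List (Int × Int)) (f : (Int × Int) → List (Int × Int)) :
    pickCands vend nodes (nodes.map f) = (qual vend nodes).map f := by
  induction nodes with
  | nil => rfl
  | cons n ns ih =>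
    rw [List.map_cons, pickCands, qual]
    by_cases h1 : vend + 1 < n.1
    · simp [h1]
    · rw [if_neg h1, if_neg h1]
      by_cases h2 : vend ≤ n.1 ∧ n.1 - 1 ≤ vend
      · rw [if_pos (by omega), if_pos h2, List.map_cons, ih]
      · rw [if_neg (by omega), if_neg h2, ih]

def pvStep (tb : List (List (Int × Int)) × List (Int × Int)) (nodes : List (Int × Int)) :
    List (List (Int × Int)) × List (Int × Int) :=
  (nodes.map (fun n => n :: pick n.2 tb.2 tb.1), nodes)

theorem foldState_pick (Ls : List (List (Int × Int))) :
    ∀ vend : Int,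
      pick vend (Ls.reverse.foldl pvStep ([], [])).2 (Ls.reverse.foldl pvStep ([], [])).1 =
        suff Ls vend := by
  induction Ls with
  | nil => intro vend; simp [pick, pickCands, suff]
  | cons L Ls ih =>
    intro vend
    rw [List.reverse_cons, List.foldl_append]
    have hmap : (L.map fun n => n :: pick n.2 (Ls.reverse.foldl pvStep ([], [])).2
        (Ls.reverse.foldl pvStep ([], [])).1) = L.map (fun n => n :: suff Ls n.2) :=
      List.map_congr_left (fun n _ => by rw [ih n.2])
    show pick vend L (L.map fun n => n :: pick n.2 (Ls.reverse.foldl pvStep ([], [])).2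
        (Ls.reverse.foldl pvStep ([], [])).1) = suff (L :: Ls) vend
    rw [hmap]
    unfold pick
    rw [pickCands_map vend L (fun n => n :: suff Ls n.2), suff]

theorem back_track_alt_eq (times : List (List (Int × Int))) (curr_ind : Int) (v : Int × Int)
    (p : List (Int × Int)) :
    back_track_alt times curr_ind v p = p ++ v :: suff (levelsFrom times curr_ind) v.2 := by
  show p ++ [v] ++ pick v.2 _ _ = _
  rw [show (fun (tb : List (List (Int × Int)) × List (Int × Int)) (nodes : List (Int × Int)) =>
        (nodes.map (fun n => n :: pick n.2 tb.2 tb.1), nodes)) = pvStep from rfl]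
  rw [foldState_pick (levelsFrom times curr_ind) v.2]
  simp

-- ===== VERDICT (by name: the statement is the Claim_ definition above) =====
theorem back_track_spec : Claim_equal_back_track := by
  intro times curr_ind curr_val prev_chain _ _
  unfold Spec_back_track
  exact (back_track_eq times (((times.length : Int) - 1 - curr_ind).toNat) curr_ind rfl
    curr_val prev_chain).trans (back_track_alt_eq times curr_ind curr_val prev_chain).symm
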